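-- pv_equiv track=rewrite | github.com/priyankaMehta1/Othello | OthelloTest.py | flipTokens2
-- ===== SOURCE A (Python) =====
-- def flipTokens2(game2,pos,table,player,opp):
--    for i in table:
--       if pos in i:
--          positions = i[:]
--          characters = [game2[x] for x in i]
--          if player in characters and opp in characters:
--             fragment = ''.join(characters)
--             setsX = ["XOX","XOOX","XOOOX","XOOOOX","XOOOOOX","XOOOOOOX"]
--             setsO = ["OXO","OXXO","OXXXO","OXXXXO","OXXXXXO","OXXXXXXO"]
--             if player == "X":
--                for x in setsX:
--                   if x in fragment:
--                      length = len(x)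
--                      index = positions.index(pos)
--                      frag1 = fragment[index:index + length]
--                      frag2 = fragment[index-length+1:index+1]
--                      if frag1 == x:
--                         for y in range(index, index+length):
--                            game2[positions[y]] = player
--                      if frag2 == x:
--                         for y in range(index-length+1,index):
--                            game2[positions[y]] = player
--             else:
--                for x in setsO:
--                   if x in fragment:
--                      length = len(x)
--                      index = positions.index(pos)
--                      frag1 = fragment[index:index + length]
--                      frag2 = fragment[index-length+1:index+1]
--                      if frag1 == x:
--                         for y in range(index, index+length):
--                            game2[positions[y]] = player
--                      if frag2 == x:
--                         for y in range(index-length+1,index):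
--                            game2[positions[y]] = player
--    return game2
-- ===== SOURCE B (Python) =====
-- def flipTokens2(game2, pos, table, player, opp):
--     c, d = ("X", "O") if player == "X" else ("O", "X")
--     for line in table:
--         if pos not in line:
--             continue
--         values = [game2[x] for x in line]
--         if player not in values or opp not in values:
--             continue
--         frag = "".join(values)
--         i = line.index(pos)
--         if i < len(frag) and frag[i] == c:
--             # rightward capture: run of d after i closed by a c
--             j = i + 1
--             while j < len(frag) and frag[j] == d:
--                 j += 1
--             if j < len(frag) and frag[j] == c and 1 <= j - i - 1 <= 6:
--                 for y in range(i, j + 1):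
--                     game2[line[y]] = player
--             # leftward capture: run of d before i opened by a c
--             j = i - 1
--             while j >= 0 and frag[j] == d:
--                 j -= 1
--             if j >= 0 and frag[j] == c and 1 <= i - j - 1 <= 6:
--                 for y in range(j, i):
--                     game2[line[y]] = player
--     return game2
-- ===== Notes on version B (the rewrite author's own statement) =====
-- stated objective: idiomatic
-- what changed: B replaces A's hardcoded pattern-string list ('XOX'..'XOOOOOOX'), substring tests and slice comparisons by a direct two-sided cell scan: from pos's index it walks right (and left) over the joined fragment while it sees the opponent token and flips the run only when a player token closes it (run length capped at 6, matching the board-sized pattern list).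
import Mathlib
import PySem

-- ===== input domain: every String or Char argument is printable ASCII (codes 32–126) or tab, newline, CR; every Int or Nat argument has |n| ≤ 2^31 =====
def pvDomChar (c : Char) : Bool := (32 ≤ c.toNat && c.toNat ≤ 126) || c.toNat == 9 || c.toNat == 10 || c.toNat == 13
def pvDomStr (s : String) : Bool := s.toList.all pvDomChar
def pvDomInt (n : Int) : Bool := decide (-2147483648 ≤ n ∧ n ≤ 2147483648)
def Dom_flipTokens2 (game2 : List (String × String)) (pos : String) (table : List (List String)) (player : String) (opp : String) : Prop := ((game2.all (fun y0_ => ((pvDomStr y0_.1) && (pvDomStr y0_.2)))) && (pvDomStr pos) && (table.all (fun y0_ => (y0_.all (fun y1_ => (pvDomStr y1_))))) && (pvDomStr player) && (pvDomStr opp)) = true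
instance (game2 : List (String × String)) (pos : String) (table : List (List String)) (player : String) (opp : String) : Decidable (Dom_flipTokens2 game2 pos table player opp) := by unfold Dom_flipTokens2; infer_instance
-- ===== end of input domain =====

-- B replaces A's hardcoded capture-pattern strings and slice comparisons by a direct two-sided
-- run scan from pos's cell (idiomatic; same results; game2 is mutated in place by both Pythons,
-- the equivalence proved here is about the returned dict).

-- ===== PORT A =====
-- the flip loop 'for y in range(a, b): game2[positions[y]] = player'
def pvFlipA (g : PySem.Dict String String) (line : List String) (player : String) (a b : Int) : PySem.Dict String String :=
  (PySem.List.pyRange a b 1).foldl (fun acc y => acc.insert (PySem.List.pyGetD line y "") player) g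

def pvSetsX : List (List Char) :=
  [['X','O','X'], ['X','O','O','X'], ['X','O','O','O','X'], ['X','O','O','O','O','X'],
   ['X','O','O','O','O','O','X'], ['X','O','O','O','O','O','O','X']]

def pvSetsO : List (List Char) :=
  [['O','X','O'], ['O','X','X','O'], ['O','X','X','X','O'], ['O','X','X','X','X','O'],
   ['O','X','X','X','X','X','O'], ['O','X','X','X','X','X','X','O']]

-- the body of 'for x in sets…' (identical in A's two branches)
def pvBodyA (line : List String) (pos player : String) (fragment : List Char)
    (g : PySem.Dict String String) (x : List Char) : PySem.Dict String String :=
  if x <:+: fragment then        -- 'x in fragment'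
    let length : Int := (x.length : Int)
    let index : Int := (((PySem.List.index? line pos).getD 0 : Nat) : Int)
    let frag1 := PySem.List.slice fragment (some index) (some (index + length))
    let frag2 := PySem.List.slice fragment (some (index - length + 1)) (some (index + 1))
    let g1 := if frag1 = x then pvFlipA g line player index (index + length) else g
    if frag2 = x then pvFlipA g1 line player (index - length + 1) index else g1
  else g

def pvLineA (pos player opp : String) (g : PySem.Dict String String) (i : List String) :
    PySem.Dict String String :=
  if pos ∈ i then
    let characters := i.map (fun x => g.getD x "")
    if player ∈ characters ∧ opp ∈ characters then
      let fragment := (characters.map String.toList).flatten   -- ''.join(characters)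
      if player = "X" then pvSetsX.foldl (pvBodyA i pos player fragment) g
      else pvSetsO.foldl (pvBodyA i pos player fragment) g
    else g
  else g

def flipTokens2 (game2 : List (String × String)) (pos : String) (table : List (List String)) (player : String) (opp : String) : List (String × String) :=
  (table.foldl (pvLineA pos player opp) (PySem.Dict.ofList game2)).items

-- ===== PORT B =====
-- 'while j < len(frag) and frag[j] == d: j += 1'
def pvScanR (f : List Char) (d : Char) (j : Nat) : Nat :=
  if h : j < f.length then (if f[j] = d then pvScanR f d (j + 1) else j) else j
termination_by f.length - j

-- 'while j >= 0 and frag[j] == d: j -= 1'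
def pvScanL (f : List Char) (d : Char) (j : Int) : Int :=
  if 0 ≤ j ∧ f[j.toNat]? = some d then pvScanL f d (j - 1) else j
termination_by (j + 1).toNat
decreasing_by rename_i h; omega

-- 'for y in range(a, b): game2[line[y]] = player'
def pvFlipB (g : PySem.Dict String String) (line : List String) (player : String) (a b : Int) : PySem.Dict String String :=
  (PySem.List.pyRange a b 1).foldl (fun acc y => acc.insert (PySem.List.pyGetD line y "") player) g

def pvLineB (pos player opp : String) (cd : Char × Char) (g : PySem.Dict String String)
    (line : List String) : PySem.Dict String String :=
  if pos ∈ line then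
    let values := line.map (fun x => g.getD x "")
    if player ∈ values ∧ opp ∈ values then
      let f := (values.map String.toList).flatten
      let i := (PySem.List.index? line pos).getD 0
      if f[i]? = some cd.1 then
        let j := pvScanR f cd.2 (i + 1)
        let g1 := if f[j]? = some cd.1 ∧ 1 ≤ j - i - 1 ∧ j - i - 1 ≤ 6
                  then pvFlipB g line player (i : Int) ((j : Int) + 1) else g
        let jl := pvScanL f cd.2 ((i : Int) - 1)
        if 0 ≤ jl ∧ f[jl.toNat]? = some cd.1 ∧ 1 ≤ (i : Int) - jl - 1 ∧ (i : Int) - jl - 1 ≤ 6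
        then pvFlipB g1 line player jl (i : Int) else g1
      else g
    else g
  else g

def flipTokens2_alt (game2 : List (String × String)) (pos : String) (table : List (List String)) (player : String) (opp : String) : List (String × String) :=
  let cd : Char × Char := if player = "X" then ('X', 'O') else ('O', 'X')
  (table.foldl (pvLineB pos player opp cd) (PySem.Dict.ofList game2)).items

-- ===== PRECONDITION & SPEC =====
-- Pre_ excludes (i) inputs where A raises KeyError: a line containing pos holds a key missing from
-- game2; and (ii), only when some line could actually capture (pos present with both tokens on it),
-- inputs whose cell values or player token are longer than one character — there the joined
-- fragment misaligns with the cell list and A can raise IndexError; this is slightly wider than the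
-- raising set (on the excluded non-raising corners A and B still agree, see the cited examples).
def Pre_flipTokens2 (game2 : List (String × String)) (pos : String) (table : List (List String)) (player : String) (opp : String) : Prop :=
  (∀ line ∈ table, pos ∈ line → ∀ x ∈ line, (PySem.Dict.ofList game2).contains x = true)
  ∧ ((∃ line ∈ table, pos ∈ line
        ∧ player ∈ line.map (fun x => (PySem.Dict.ofList game2).getD x "")
        ∧ opp ∈ line.map (fun x => (PySem.Dict.ofList game2).getD x "")) →
      ((∀ line ∈ table, pos ∈ line → ∀ x ∈ line,
          ((PySem.Dict.ofList game2).getD x "").toList.length ≤ 1)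
        ∧ player.toList.length ≤ 1))

instance (game2 : List (String × String)) (pos : String) (table : List (List String)) (player : String) (opp : String) : Decidable (Pre_flipTokens2 game2 pos table player opp) := by
  unfold Pre_flipTokens2; infer_instance

def pvWitness_flipTokens2 : (List (String × String)) × String × List (List String) × String × String :=
  ([("a", "X"), ("b", "O"), ("c", "X")], "b", [["a", "b", "c"]], "X", "O")

def Spec_flipTokens2 (game2 : List (String × String)) (pos : String) (table : List (List String)) (player : String) (opp : String) (out : List (String × String)) : Prop := out = flipTokens2_alt game2 pos table player opp
instance (game2 : List (String × String)) (pos : String) (table : List (List String)) (player : String) (opp : String) (out : List (String × String)) : Decidable (Spec_flipTokens2 game2 pos table player opp out) := by unfold Spec_flipTokens2; infer_instance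

-- ===== CLAIM (what is proved, stated in full; the proofs are below) =====
def Claim_equal_flipTokens2 : Prop := ∀ (game2 : List (String × String)) (pos : String) (table : List (List String)) (player : String) (opp : String), Dom_flipTokens2 game2 pos table player opp → Pre_flipTokens2 game2 pos table player opp → Spec_flipTokens2 game2 pos table player opp (flipTokens2 game2 pos table player opp)

-- ===== LEMMAS AND PROOFS =====

theorem pvWitness_ok :
    Dom_flipTokens2 pvWitness_flipTokens2.1 pvWitness_flipTokens2.2.1 pvWitness_flipTokens2.2.2.1
      pvWitness_flipTokens2.2.2.2.1 pvWitness_flipTokens2.2.2.2.2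
    ∧ Pre_flipTokens2 pvWitness_flipTokens2.1 pvWitness_flipTokens2.2.1 pvWitness_flipTokens2.2.2.1
      pvWitness_flipTokens2.2.2.2.1 pvWitness_flipTokens2.2.2.2.2 := by
  constructor <;> decide

theorem scanR_hit (f : List Char) (d : Char) (j : Nat) (h : f[j]? = some d) :
    pvScanR f d j = pvScanR f d (j + 1) := by
  have hj : j < f.length := (List.getElem?_eq_some_iff.mp h).1
  rw [pvScanR, dif_pos hj, if_pos ((List.getElem?_eq_some_iff.mp h).2)]

theorem scanR_miss (f : List Char) (d : Char) (j : Nat) (h : f[j]? ≠ some d) :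
    pvScanR f d j = j := by
  rw [pvScanR]
  by_cases hj : j < f.length
  · rw [dif_pos hj, if_neg]
    intro he
    exact h (by rw [List.getElem?_eq_some_iff]; exact ⟨hj, he⟩)
  · rw [dif_neg hj]

theorem scanR_ge (f : List Char) (d : Char) (j : Nat) : j ≤ pvScanR f d j := by
  fun_induction pvScanR <;> omega

theorem prefix_drop_cons (f : List Char) (a : Char) (t : List Char) (j : Nat) :
    a :: t <+: f.drop j ↔ f[j]? = some a ∧ t <+: f.drop (j + 1) := by
  constructor
  · intro h
    have hj : j < f.length := by
      by_contra hc
      rw [List.drop_eq_nil_of_le (by omega)] at h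
      rcases h with ⟨t', ht'⟩
      simp at ht'
    rw [List.drop_eq_getElem_cons hj] at h
    obtain ⟨ha, ht⟩ := List.cons_prefix_cons.mp h
    exact ⟨by rw [List.getElem?_eq_some_iff]; exact ⟨hj, ha.symm⟩, ht⟩
  · rintro ⟨h1, h2⟩
    have hj : j < f.length := (List.getElem?_eq_some_iff.mp h1).1
    rw [List.drop_eq_getElem_cons hj, (List.getElem?_eq_some_iff.mp h1).2]
    exact List.cons_prefix_cons.mpr ⟨rfl, h2⟩

theorem scanR_mem (f : List Char) (d : Char) (j : Nat) :
    ∀ t, j ≤ t → t < pvScanR f d j → f[t]? = some d := by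
  fun_induction pvScanR with
  | case1 j hj hd ih =>
      intro t h1 h2
      rcases Nat.eq_or_lt_of_le h1 with he | hlt
      · subst he; rw [List.getElem?_eq_some_iff]; exact ⟨hj, hd⟩
      · exact ih t hlt h2
  | case2 j hj hd => intro t h1 h2; omega
  | case3 j hj => intro t h1 h2; omega

theorem scanR_run_eq (f : List Char) (d : Char) (m : Nat) :
    ∀ j, j ≤ m → (∀ t, j ≤ t → t < m → f[t]? = some d) → f[m]? ≠ some d →
    pvScanR f d j = m := by
  intro j hm hrun hstop
  induction hn : m - j generalizing j with
  | zero =>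
      have : j = m := by omega
      subst this; exact scanR_miss f d j hstop
  | succ n ih =>
      have hjm : j < m := by omega
      rw [scanR_hit f d j (hrun j le_rfl hjm)]
      exact ih (j + 1) (by omega) (fun t h1 h2 => hrun t (by omega) h2) (by omega)

theorem scanL_hit (f : List Char) (d : Char) (j : Int) (h0 : 0 ≤ j) (h : f[j.toNat]? = some d) :
    pvScanL f d j = pvScanL f d (j - 1) := by
  rw [pvScanL, if_pos ⟨h0, h⟩]

theorem scanL_miss (f : List Char) (d : Char) (j : Int) (h : ¬(0 ≤ j ∧ f[j.toNat]? = some d)) :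
    pvScanL f d j = j := by
  rw [pvScanL, if_neg h]

theorem scanL_le (f : List Char) (d : Char) (j : Int) : pvScanL f d j ≤ j := by
  fun_induction pvScanL <;> omega

theorem scanL_ge (f : List Char) (d : Char) (j : Int) (h : -1 ≤ j) : -1 ≤ pvScanL f d j := by
  fun_induction pvScanL with
  | case1 j hc ih => exact ih (by omega)
  | case2 j hc => omega

theorem scanL_mem (f : List Char) (d : Char) (j : Int) :
    ∀ t : Int, pvScanL f d j < t → t ≤ j → 0 ≤ t ∧ f[t.toNat]? = some d := by
  fun_induction pvScanL with
  | case1 j hc ih =>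
      intro t h1 h2
      rcases eq_or_lt_of_le h2 with he | hlt
      · subst he; exact hc
      · exact ih t h1 (by omega)
  | case2 j hc => intro t h1 h2; omega

theorem scanL_run_eq (f : List Char) (d : Char) (m : Int) (hm1 : -1 ≤ m) :
    ∀ j : Int, m ≤ j → (∀ t : Int, m < t → t ≤ j → f[t.toNat]? = some d) →
    ¬(0 ≤ m ∧ f[m.toNat]? = some d) → pvScanL f d j = m := by
  intro j hm hrun hstop
  induction hn : (j - m).toNat generalizing j with
  | zero =>
      have : j = m := by omega
      subst this; exact scanL_miss f d j hstop
  | succ n ih =>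
      have hjm : m < j := by omega
      rw [scanL_hit f d j (by omega) (hrun j hjm le_rfl)]
      exact ih (j - 1) (by omega) (fun t h1 h2 => hrun t h1 (by omega)) (by omega)

def pvPat (c d : Char) (k : Nat) : List Char := c :: (List.replicate k d ++ [c])

theorem pvPat_length (c d : Char) (k : Nat) : (pvPat c d k).length = k + 2 := by
  simp [pvPat]

theorem pvSetsX_eq : pvSetsX = [1, 2, 3, 4, 5, 6].map (pvPat 'X' 'O') := by decide
theorem pvSetsO_eq : pvSetsO = [1, 2, 3, 4, 5, 6].map (pvPat 'O' 'X') := by decide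

theorem rep_prefix_iff (f : List Char) (c d : Char) (hcd : c ≠ d) :
    ∀ (k j : Nat), (List.replicate k d ++ [c]) <+: f.drop j ↔
      (pvScanR f d j = j + k ∧ f[j + k]? = some c) := by
  intro k
  induction k with
  | zero =>
      intro j
      simp only [List.replicate, List.nil_append, Nat.add_zero]
      rw [prefix_drop_cons]
      constructor
      · rintro ⟨h1, -⟩
        refine ⟨scanR_miss f d j ?_, h1⟩
        rw [h1]; simp [hcd]
      · rintro ⟨-, h1⟩
        exact ⟨h1, List.nil_prefix⟩
  | succ k ih =>
      intro j
      have hr : List.replicate (k + 1) d ++ [c] = d :: (List.replicate k d ++ [c]) := by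
        simp [List.replicate_succ]
      rw [hr, prefix_drop_cons, ih (j + 1)]
      constructor
      · rintro ⟨h1, h2, h3⟩
        refine ⟨?_, by rw [show j + (k + 1) = j + 1 + k by omega]; exact h3⟩
        rw [scanR_hit f d j h1, h2]; omega
      · rintro ⟨h1, h2⟩
        have hne : pvScanR f d j ≠ j := by omega
        have hd : f[j]? = some d := by
          by_contra hc
          exact hne (scanR_miss f d j hc)
        refine ⟨hd, ?_, by rw [show j + 1 + k = j + (k + 1) by omega]; exact h2⟩
        rw [← scanR_hit f d j hd, h1]; omega

theorem pat_prefix_iff (f : List Char) (c d : Char) (hcd : c ≠ d) (k j : Nat) :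
    pvPat c d k <+: f.drop j ↔
      (f[j]? = some c ∧ pvScanR f d (j + 1) = (j + 1) + k ∧ f[(j + 1) + k]? = some c) := by
  rw [pvPat, prefix_drop_cons, rep_prefix_iff f c d hcd k (j + 1)]

theorem take_eq_pat_iff (f : List Char) (c d : Char) (k j : Nat) :
    (f.drop j).take (k + 2) = pvPat c d k ↔ pvPat c d k <+: f.drop j := by
  constructor
  · intro h; rw [← h]; exact List.take_prefix _ _
  · intro h
    obtain ⟨t, ht⟩ := h
    rw [← ht, ← pvPat_length c d k, List.take_left]

theorem pat_infix_of_take (f : List Char) (c d : Char) (k j : Nat)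
    (h : (f.drop j).take (k + 2) = pvPat c d k) : pvPat c d k <:+: f := by
  rw [← h]
  exact ((List.take_prefix _ _).isInfix).trans (List.drop_suffix j f).isInfix

theorem slice_len_le (f : List Char) (a : Option Int) (b : Int) (hb : 0 ≤ b) :
    (PySem.List.slice f a (some b)).length ≤ b.toNat := by
  rcases a with _ | a <;>
  · simp only [PySem.List.slice, PySem.List.clampIdx, List.length_take, List.length_drop]
    split_ifs <;> omega

theorem dict_insert_comm {κ ν : Type} [BEq κ] [LawfulBEq κ] (g : PySem.Dict κ ν) (k1 k2 : κ)
    (v : ν) (h : g.contains k1 = true) :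
    (g.insert k2 v).insert k1 v = (g.insert k1 v).insert k2 v := by
  by_cases he : k1 = k2
  · subst he; rfl
  · apply PySem.Dict.ext
    have hc1 : (g.insert k2 v).contains k1 = true := by
      rw [PySem.Dict.contains_insert]; simp [h]
    by_cases h2 : g.contains k2 = true
    · have hc2 : (g.insert k1 v).contains k2 = true := by
        rw [PySem.Dict.contains_insert]; simp [h2]
      rw [PySem.Dict.items_insert_of_contains _ v hc1,
          PySem.Dict.items_insert_of_contains _ v h2,
          PySem.Dict.items_insert_of_contains _ v hc2,
          PySem.Dict.items_insert_of_contains _ v h]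
      rw [List.map_map, List.map_map]
      apply List.map_congr_left
      intro p hp
      simp only [Function.comp]
      by_cases hpk1 : p.1 = k1
      · simp [hpk1, he]
      · by_cases hpk2 : p.1 = k2
        · simp [hpk2, Ne.symm he]
        · simp [hpk1, hpk2]
    · have hc2 : (g.insert k1 v).contains k2 = false := by
        rw [PySem.Dict.contains_insert]; simp [h2, Ne.symm he]
      rw [PySem.Dict.items_insert_of_contains _ v hc1,
          PySem.Dict.items_insert_of_not_contains _ v (by simp [h2]),
          PySem.Dict.items_insert_of_not_contains _ v hc2,
          PySem.Dict.items_insert_of_contains _ v h]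
      rw [List.map_append]
      congr 1
      simp [Ne.symm he]

theorem dict_contains_insert_mono {κ ν : Type} [BEq κ] [LawfulBEq κ] (g : PySem.Dict κ ν)
    (k x : κ) (v : ν) (h : g.contains x = true) : (g.insert k v).contains x = true := by
  rw [PySem.Dict.contains_insert]; simp [h]

theorem contains_foldl_insert_mono (ys : List Int) (line : List String) (player : String)
    (x : String) :
    ∀ g : PySem.Dict String String, g.contains x = true →
      (ys.foldl (fun acc y => acc.insert (PySem.List.pyGetD line y "") player) g).contains x = true := by
  induction ys with
  | nil => intro g h; exact h
  | cons y ys ih => intro g h; exact ih _ (dict_contains_insert_mono _ _ _ _ h)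

theorem contains_flip_mono (g : PySem.Dict String String) (line : List String) (player : String)
    (a b : Int) (x : String) (h : g.contains x = true) :
    (pvFlipB g line player a b).contains x = true :=
  contains_foldl_insert_mono _ _ _ _ _ h

theorem flip_insert_comm (line : List String) (player : String) (a b : Int) (k : String) :
    ∀ g : PySem.Dict String String, g.contains k = true →
      pvFlipB (g.insert k player) line player a b = (pvFlipB g line player a b).insert k player := by
  unfold pvFlipB
  generalize PySem.List.pyRange a b 1 = ys
  induction ys with
  | nil => intro g h; rfl
  | cons y ys ih =>
      intro g h
      simp only [List.foldl_cons]
      rw [← dict_insert_comm g k (PySem.List.pyGetD line y "") player h]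
      exact ih _ (dict_contains_insert_mono _ _ _ _ h)

theorem foldl_ins_flip_comm (line : List String) (player : String) (aR bR : Int) (ys : List Int) :
    ∀ g : PySem.Dict String String, (∀ y ∈ ys, g.contains (PySem.List.pyGetD line y "") = true) →
      ys.foldl (fun acc y => acc.insert (PySem.List.pyGetD line y "") player)
          (pvFlipB g line player aR bR)
        = pvFlipB (ys.foldl (fun acc y => acc.insert (PySem.List.pyGetD line y "") player) g)
            line player aR bR := by
  induction ys with
  | nil => intro g h; rfl
  | cons y ys ih =>
      intro g h
      simp only [List.foldl_cons]
      rw [← flip_insert_comm line player aR bR _ g (h y (by simp))]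
      exact ih _ (fun y' hy' => dict_contains_insert_mono _ _ _ _ (h y' (by simp [hy'])))

theorem flip_flip_comm (g : PySem.Dict String String) (line : List String) (player : String)
    (aL bL aR bR : Int)
    (hkeys : ∀ y ∈ PySem.List.pyRange aL bL 1, g.contains (PySem.List.pyGetD line y "") = true) :
    pvFlipB (pvFlipB g line player aR bR) line player aL bL
      = pvFlipB (pvFlipB g line player aL bL) line player aR bR := by
  conv_lhs => rw [pvFlipB]
  rw [foldl_ins_flip_comm line player aR bR _ g hkeys]
  rfl

theorem fold_two_hits {α : Type} (FL FR : α → α) (kr kl : Nat) (qc pc : Prop)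
    [Decidable qc] [Decidable pc] (Inv : α → Prop)
    (hFL : ∀ a, Inv a → Inv (FL a)) (hFR : ∀ a, Inv a → Inv (FR a))
    (hcomm : pc → qc → ∀ a, Inv a → FL (FR a) = FR (FL a)) :
    ∀ (ks : List Nat), ks.Nodup → ∀ a, Inv a →
      ks.foldl (fun b k =>
          (fun b1 => if k = kl ∧ pc then FL b1 else b1) (if k = kr ∧ qc then FR b else b)) a
        = (fun b1 => if kl ∈ ks ∧ pc then FL b1 else b1) (if kr ∈ ks ∧ qc then FR a else a) := by
  intro ks
  induction ks with
  | nil => intro _ a _; simp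
  | cons k ks ih =>
      intro hnd a hInv
      have hnd' : ks.Nodup := (List.nodup_cons.mp hnd).2
      have hk : k ∉ ks := (List.nodup_cons.mp hnd).1
      simp only [List.foldl_cons, List.mem_cons]
      set hd := (fun b1 => if k = kl ∧ pc then FL b1 else b1) (if k = kr ∧ qc then FR a else a) with hhd
      have hInv' : Inv hd := by
        rw [hhd]
        split_ifs <;> [exact hFL _ (hFR _ hInv); exact hFL _ hInv; exact hFR _ hInv; exact hInv]
      rw [ih hnd' hd hInv']
      beta_reduce
      by_cases hpc : pc <;> by_cases hqc : qc <;>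
        by_cases hkl : k = kl <;> by_cases hkr : k = kr <;>
        by_cases hklm : kl ∈ ks <;> by_cases hkrm : kr ∈ ks <;>
        first
          | (exact absurd (show k ∈ ks by rw [hkl]; exact hklm) hk)
          | (exact absurd (show k ∈ ks by rw [hkr]; exact hkrm) hk)
          | ((try subst hkl); (try subst hkr); simp only [hhd]; simp_all; try rfl)
      all_goals try (rw [if_neg (show ¬(kr = k) from fun hx => hkr hx.symm)])
      all_goals try (rw [if_neg (show ¬(kl = k) from fun hx => hkl hx.symm)])
      all_goals try (intro hx; exact absurd hx.symm hkl)
      all_goals try (intro hx; exact absurd hx.symm hkr)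


-- ---- right/left capture characterizations ----
theorem hRiff (f : List Char) (c d : Char) (hcd : c ≠ d) (i k : Nat) :
    (PySem.List.slice f (some (i : Int)) (some ((i : Int) + ((k + 2 : Nat) : Int))) = pvPat c d k)
      ↔ (k = pvScanR f d (i + 1) - (i + 1)
          ∧ (f[i]? = some c ∧ f[pvScanR f d (i + 1)]? = some c)) := by
  rw [PySem.List.slice_natCast_add, take_eq_pat_iff, pat_prefix_iff f c d hcd k i]
  have hge := scanR_ge f d (i + 1)
  constructor
  · rintro ⟨h1, h2, h3⟩
    refine ⟨by omega, h1, ?_⟩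
    rw [h2]; exact h3
  · rintro ⟨h1, h2, h3⟩
    have he : pvScanR f d (i + 1) = i + 1 + k := by omega
    exact ⟨h2, he, by rw [← he]; exact h3⟩

theorem hLiff (f : List Char) (c d : Char) (hcd : c ≠ d) (i k : Nat) (hk : 1 ≤ k)
    (hfi : f[i]? = some c) :
    (PySem.List.slice f (some ((i : Int) - ((k + 2 : Nat) : Int) + 1)) (some ((i : Int) + 1))
        = pvPat c d k)
      ↔ (k = ((i : Int) - 1 - pvScanL f d ((i : Int) - 1)).toNat
          ∧ (0 ≤ pvScanL f d ((i : Int) - 1)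
             ∧ f[(pvScanL f d ((i : Int) - 1)).toNat]? = some c)) := by
  have hjl_le := scanL_le f d ((i : Int) - 1)
  have hjl_ge := scanL_ge f d ((i : Int) - 1) (by omega)
  by_cases hki : k + 1 ≤ i
  · have ha : (i : Int) - ((k + 2 : Nat) : Int) + 1 = ((i - (k + 1) : Nat) : Int) := by
      push_cast; omega
    have hb : (i : Int) + 1 = ((i - (k + 1) : Nat) : Int) + ((k + 2 : Nat) : Int) := by
      push_cast; omega
    rw [ha, hb, PySem.List.slice_natCast_add, take_eq_pat_iff,
        pat_prefix_iff f c d hcd k (i - (k + 1))]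
    rw [show i - (k + 1) + 1 = i - k by omega, show i - k + k = i by omega]
    constructor
    · rintro ⟨h1, h2, h3⟩
      have hrun : ∀ t : Int, (i : Int) - (k + 1) < t → t ≤ (i : Int) - 1 →
          f[t.toNat]? = some d := by
        intro t ht1 ht2
        exact scanR_mem f d (i - k) t.toNat (by omega) (by rw [h2]; omega)
      have hstop : ¬(0 ≤ (i : Int) - (k + 1) ∧ f[((i : Int) - (k + 1)).toNat]? = some d) := by
        rintro ⟨-, hcon⟩
        rw [show ((i : Int) - (k + 1)).toNat = i - (k + 1) by omega] at hcon
        rw [h1] at hcon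
        exact hcd (Option.some.injEq .. ▸ hcon)
      have hL := scanL_run_eq f d ((i : Int) - (k + 1)) (by omega) ((i : Int) - 1) (by omega)
        hrun hstop
      refine ⟨by omega, by omega, ?_⟩
      rw [hL, show ((i : Int) - (k + 1)).toNat = i - (k + 1) by omega]
      exact h1
    · rintro ⟨h1, h2, h3⟩
      have hjl : pvScanL f d ((i : Int) - 1) = (i : Int) - (k + 1) := by omega
      rw [hjl] at h3
      rw [show ((i : Int) - (k + 1)).toNat = i - (k + 1) by omega] at h3
      refine ⟨h3, ?_, hfi⟩
      apply scanR_run_eq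
      · omega
      · intro t ht1 ht2
        have := scanL_mem f d ((i : Int) - 1) (t : Int) (by omega) (by omega)
        rw [show ((t : Nat) : Int).toNat = t by omega] at this
        exact this.2
      · rw [hfi]; simp [hcd]
  · constructor
    · intro h
      exfalso
      have hlen := slice_len_le f (some ((i : Int) - ((k + 2 : Nat) : Int) + 1)) ((i : Int) + 1)
        (by omega)
      rw [h, pvPat_length] at hlen
      omega
    · rintro ⟨h1, h2, -⟩
      omega

theorem hR_infix (f : List Char) (c d : Char) (hcd : c ≠ d) (i k : Nat)
    (h : k = pvScanR f d (i + 1) - (i + 1) ∧ (f[i]? = some c ∧ f[pvScanR f d (i + 1)]? = some c)) :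
    pvPat c d k <:+: f := by
  have hge := scanR_ge f d (i + 1)
  obtain ⟨h1, h2, h3⟩ := h
  have he : pvScanR f d (i + 1) = i + 1 + k := by omega
  apply pat_infix_of_take f c d k i
  rw [take_eq_pat_iff, pat_prefix_iff f c d hcd k i]
  exact ⟨h2, he, by rw [← he]; exact h3⟩

theorem hL_infix (f : List Char) (c d : Char) (hcd : c ≠ d) (i k : Nat) (hk : 1 ≤ k)
    (hfi : f[i]? = some c)
    (h : k = ((i : Int) - 1 - pvScanL f d ((i : Int) - 1)).toNat
          ∧ (0 ≤ pvScanL f d ((i : Int) - 1)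
             ∧ f[(pvScanL f d ((i : Int) - 1)).toNat]? = some c)) :
    pvPat c d k <:+: f := by
  have hjl_le := scanL_le f d ((i : Int) - 1)
  have hki : k + 1 ≤ i := by omega
  have hsl := (hLiff f c d hcd i k hk hfi).mpr h
  have ha : (i : Int) - ((k + 2 : Nat) : Int) + 1 = ((i - (k + 1) : Nat) : Int) := by
    push_cast; omega
  have hb : (i : Int) + 1 = ((i - (k + 1) : Nat) : Int) + ((k + 2 : Nat) : Int) := by
    push_cast; omega
  rw [ha, hb, PySem.List.slice_natCast_add] at hsl
  exact pat_infix_of_take f c d k (i - (k + 1)) hsl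


theorem pvFlipA_eq : @pvFlipA = @pvFlipB := rfl

theorem bodyA_eq (line : List String) (pos player : String) (f : List Char) (c d : Char)
    (hcd : c ≠ d) (i : Nat) (hi : PySem.List.index? line pos = some i) (k : Nat) (hk : 1 ≤ k)
    (g : PySem.Dict String String) :
    pvBodyA line pos player f g (pvPat c d k)
      = (fun b1 => if k = ((i : Int) - 1 - pvScanL f d ((i : Int) - 1)).toNat
                      ∧ (f[i]? = some c ∧ 0 ≤ pvScanL f d ((i : Int) - 1)
                         ∧ f[(pvScanL f d ((i : Int) - 1)).toNat]? = some c)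
                   then pvFlipB b1 line player (pvScanL f d ((i : Int) - 1)) (i : Int) else b1)
          (if k = pvScanR f d (i + 1) - (i + 1)
              ∧ (f[i]? = some c ∧ f[pvScanR f d (i + 1)]? = some c)
           then pvFlipB g line player (i : Int) ((pvScanR f d (i + 1) : Int) + 1) else g) := by
  beta_reduce
  have hge := scanR_ge f d (i + 1)
  have hjl_le := scanL_le f d ((i : Int) - 1)
  have hcR : ∀ b : PySem.Dict String String,
      (if k = pvScanR f d (i + 1) - (i + 1)
          ∧ (f[i]? = some c ∧ f[pvScanR f d (i + 1)]? = some c)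
       then pvFlipB b line player (i : Int) ((pvScanR f d (i + 1) : Int) + 1) else b)
      = (if PySem.List.slice f (some (i : Int)) (some ((i : Int) + ((k + 2 : Nat) : Int)))
            = pvPat c d k
         then pvFlipB b line player (i : Int) ((i : Int) + ((k + 2 : Nat) : Int)) else b) := by
    intro b
    by_cases hc : k = pvScanR f d (i + 1) - (i + 1)
        ∧ (f[i]? = some c ∧ f[pvScanR f d (i + 1)]? = some c)
    · rw [if_pos hc, if_pos ((hRiff f c d hcd i k).mpr hc)]
      have : ((pvScanR f d (i + 1) : Nat) : Int) + 1 = (i : Int) + ((k + 2 : Nat) : Int) := by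
        push_cast; omega
      rw [this]
    · rw [if_neg hc, if_neg (fun hx => hc ((hRiff f c d hcd i k).mp hx))]
  have hcL : ∀ hfi : f[i]? = some c, ∀ b : PySem.Dict String String,
      (if k = ((i : Int) - 1 - pvScanL f d ((i : Int) - 1)).toNat
          ∧ (f[i]? = some c ∧ 0 ≤ pvScanL f d ((i : Int) - 1)
             ∧ f[(pvScanL f d ((i : Int) - 1)).toNat]? = some c)
       then pvFlipB b line player (pvScanL f d ((i : Int) - 1)) (i : Int) else b)
      = (if PySem.List.slice f (some ((i : Int) - ((k + 2 : Nat) : Int) + 1)) (some ((i : Int) + 1))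
            = pvPat c d k
         then pvFlipB b line player ((i : Int) - ((k + 2 : Nat) : Int) + 1) (i : Int) else b) := by
    intro hfi b
    by_cases hc : k = ((i : Int) - 1 - pvScanL f d ((i : Int) - 1)).toNat
        ∧ (0 ≤ pvScanL f d ((i : Int) - 1) ∧ f[(pvScanL f d ((i : Int) - 1)).toNat]? = some c)
    · rw [if_pos ⟨hc.1, hfi, hc.2⟩, if_pos ((hLiff f c d hcd i k hk hfi).mpr hc)]
      have : pvScanL f d ((i : Int) - 1) = (i : Int) - ((k + 2 : Nat) : Int) + 1 := by
        push_cast; omega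
      rw [this]
    · rw [if_neg (fun hx => hc ⟨hx.1, hx.2.2⟩),
          if_neg (fun hx => hc ((hLiff f c d hcd i k hk hfi).mp hx))]
  by_cases hin : pvPat c d k <:+: f
  · by_cases hfi : f[i]? = some c
    · rw [hcR, hcL hfi]
      simp only [pvBodyA, pvFlipA_eq, hi, Option.getD_some, pvPat_length]
      rw [if_pos hin]
    · have hnR : ¬(k = pvScanR f d (i + 1) - (i + 1)
          ∧ (f[i]? = some c ∧ f[pvScanR f d (i + 1)]? = some c)) := fun hx => hfi hx.2.1
      have hnL : ¬(k = ((i : Int) - 1 - pvScanL f d ((i : Int) - 1)).toNat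
          ∧ (f[i]? = some c ∧ 0 ≤ pvScanL f d ((i : Int) - 1)
             ∧ f[(pvScanL f d ((i : Int) - 1)).toNat]? = some c)) := fun hx => hfi hx.2.1
      rw [if_neg hnR, if_neg hnL]
      have hnR' : ¬(PySem.List.slice f (some (i : Int)) (some ((i : Int) + ((k + 2 : Nat) : Int)))
          = pvPat c d k) := fun hx => hnR ((hRiff f c d hcd i k).mp hx)
      have hnL' : ¬(PySem.List.slice f (some ((i : Int) - ((k + 2 : Nat) : Int) + 1))
          (some ((i : Int) + 1)) = pvPat c d k) := by
        intro hx
        have h1 := (hRiff f c d hcd i k)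
        -- a left slice equal to the pattern forces f[i]? = some c
        have hki : k + 1 ≤ i := by
          by_contra hko
          have hlen := slice_len_le f (some ((i : Int) - ((k + 2 : Nat) : Int) + 1))
            ((i : Int) + 1) (by omega)
          rw [hx, pvPat_length] at hlen
          omega
        have ha : (i : Int) - ((k + 2 : Nat) : Int) + 1 = ((i - (k + 1) : Nat) : Int) := by
          push_cast; omega
        have hb : (i : Int) + 1 = ((i - (k + 1) : Nat) : Int) + ((k + 2 : Nat) : Int) := by
          push_cast; omega
        rw [ha, hb, PySem.List.slice_natCast_add, take_eq_pat_iff,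
            pat_prefix_iff f c d hcd k (i - (k + 1))] at hx
        rw [show i - (k + 1) + 1 + k = i by omega] at hx
        exact hfi hx.2.2
      simp only [pvBodyA, pvFlipA_eq, hi, Option.getD_some, pvPat_length]
      rw [if_pos hin, if_neg hnR', if_neg hnL']
  · have hnR : ¬(k = pvScanR f d (i + 1) - (i + 1)
        ∧ (f[i]? = some c ∧ f[pvScanR f d (i + 1)]? = some c)) :=
      fun hx => hin (hR_infix f c d hcd i k hx)
    have hnL : ¬(k = ((i : Int) - 1 - pvScanL f d ((i : Int) - 1)).toNat
        ∧ (f[i]? = some c ∧ 0 ≤ pvScanL f d ((i : Int) - 1)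
           ∧ f[(pvScanL f d ((i : Int) - 1)).toNat]? = some c)) :=
      fun hx => hin (hL_infix f c d hcd i k hk hx.2.1 ⟨hx.1, hx.2.2⟩)
    rw [if_neg hnR, if_neg hnL]
    simp only [pvBodyA]
    rw [if_neg hin]


theorem mem_16 (n : Nat) : n ∈ [1, 2, 3, 4, 5, 6] ↔ 1 ≤ n ∧ n ≤ 6 := by
  simp; omega

theorem lineA_inner (line : List String) (pos player : String) (f : List Char) (c d : Char)
    (hcd : c ≠ d) (i : Nat) (hi : PySem.List.index? line pos = some i) (hilen : i < line.length)
    (g : PySem.Dict String String) (hkeys : ∀ x ∈ line, g.contains x = true) :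
    ([1, 2, 3, 4, 5, 6].map (pvPat c d)).foldl (pvBodyA line pos player f) g
      = (fun b1 => if (((i : Int) - 1 - pvScanL f d ((i : Int) - 1)).toNat ∈ [1, 2, 3, 4, 5, 6]
                        ∧ (f[i]? = some c ∧ 0 ≤ pvScanL f d ((i : Int) - 1)
                           ∧ f[(pvScanL f d ((i : Int) - 1)).toNat]? = some c))
                    then pvFlipB b1 line player (pvScanL f d ((i : Int) - 1)) (i : Int) else b1)
          (if (pvScanR f d (i + 1) - (i + 1) ∈ [1, 2, 3, 4, 5, 6]
                ∧ (f[i]? = some c ∧ f[pvScanR f d (i + 1)]? = some c))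
           then pvFlipB g line player (i : Int) ((pvScanR f d (i + 1) : Int) + 1) else g) := by
  rw [List.foldl_map]
  have hstep : ∀ (b : PySem.Dict String String) (k : Nat), k ∈ [1, 2, 3, 4, 5, 6] →
      pvBodyA line pos player f b (pvPat c d k)
        = (fun b1 => if k = ((i : Int) - 1 - pvScanL f d ((i : Int) - 1)).toNat
                        ∧ (f[i]? = some c ∧ 0 ≤ pvScanL f d ((i : Int) - 1)
                           ∧ f[(pvScanL f d ((i : Int) - 1)).toNat]? = some c)
                     then pvFlipB b1 line player (pvScanL f d ((i : Int) - 1)) (i : Int) else b1)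
            (if k = pvScanR f d (i + 1) - (i + 1)
                ∧ (f[i]? = some c ∧ f[pvScanR f d (i + 1)]? = some c)
             then pvFlipB b line player (i : Int) ((pvScanR f d (i + 1) : Int) + 1) else b) := by
    intro b k hkmem
    exact bodyA_eq line pos player f c d hcd i hi k (by rcases (mem_16 k).mp hkmem with ⟨h1, -⟩; exact h1) b
  rw [PySem.List.foldl_congr_mem _ _ _ _ hstep]
  exact fold_two_hits
    (fun b1 => pvFlipB b1 line player (pvScanL f d ((i : Int) - 1)) (i : Int))
    (fun b1 => pvFlipB b1 line player (i : Int) ((pvScanR f d (i + 1) : Int) + 1))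
    (pvScanR f d (i + 1) - (i + 1)) (((i : Int) - 1 - pvScanL f d ((i : Int) - 1)).toNat)
    (f[i]? = some c ∧ f[pvScanR f d (i + 1)]? = some c)
    (f[i]? = some c ∧ 0 ≤ pvScanL f d ((i : Int) - 1)
      ∧ f[(pvScanL f d ((i : Int) - 1)).toNat]? = some c)
    (fun a => ∀ x ∈ line, a.contains x = true)
    (fun a ha x hx => contains_flip_mono a line player _ _ x (ha x hx))
    (fun a ha x hx => contains_flip_mono a line player _ _ x (ha x hx))
    (fun hpc hqc a ha => by
      apply flip_flip_comm
      intro y hy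
      rw [PySem.List.mem_pyRange_one] at hy
      have h0y : 0 ≤ y := le_trans hpc.2.1 hy.1
      have hylen : y < (line.length : Int) := by
        have := hy.2
        omega
      rw [PySem.List.pyGetD_eq_getElem line "" h0y (by exact_mod_cast hylen)]
      exact ha _ (List.getElem_mem _))
    [1, 2, 3, 4, 5, 6] (by decide) g hkeys

theorem inner_to_B (line : List String) (pos player : String) (f : List Char) (c d : Char)
    (hcd : c ≠ d) (i : Nat) (hi : PySem.List.index? line pos = some i) (hilen : i < line.length)
    (g : PySem.Dict String String) (hkeys : ∀ x ∈ line, g.contains x = true) :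
    ([1, 2, 3, 4, 5, 6].map (pvPat c d)).foldl (pvBodyA line pos player f) g
      = (if f[i]? = some c then
          (if f[pvScanR f d (i + 1)]? = some c ∧ 1 ≤ pvScanR f d (i + 1) - i - 1
              ∧ pvScanR f d (i + 1) - i - 1 ≤ 6
           then (fun g1 => if 0 ≤ pvScanL f d ((i : Int) - 1)
                    ∧ f[(pvScanL f d ((i : Int) - 1)).toNat]? = some c
                    ∧ 1 ≤ (i : Int) - pvScanL f d ((i : Int) - 1) - 1
                    ∧ (i : Int) - pvScanL f d ((i : Int) - 1) - 1 ≤ 6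
                 then pvFlipB g1 line player (pvScanL f d ((i : Int) - 1)) (i : Int) else g1)
                (pvFlipB g line player (i : Int) ((pvScanR f d (i + 1) : Int) + 1))
           else (fun g1 => if 0 ≤ pvScanL f d ((i : Int) - 1)
                    ∧ f[(pvScanL f d ((i : Int) - 1)).toNat]? = some c
                    ∧ 1 ≤ (i : Int) - pvScanL f d ((i : Int) - 1) - 1
                    ∧ (i : Int) - pvScanL f d ((i : Int) - 1) - 1 ≤ 6
                 then pvFlipB g1 line player (pvScanL f d ((i : Int) - 1)) (i : Int) else g1) g)
         else g) := by
  rw [lineA_inner line pos player f c d hcd i hi hilen g hkeys]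
  beta_reduce
  have hge := scanR_ge f d (i + 1)
  have hjl_le := scanL_le f d ((i : Int) - 1)
  have hjl_ge := scanL_ge f d ((i : Int) - 1) (by omega)
  by_cases hfi : f[i]? = some c
  · rw [if_pos hfi]
    have hRc : (pvScanR f d (i + 1) - (i + 1) ∈ [1, 2, 3, 4, 5, 6]
          ∧ (f[i]? = some c ∧ f[pvScanR f d (i + 1)]? = some c))
        ↔ (f[pvScanR f d (i + 1)]? = some c ∧ 1 ≤ pvScanR f d (i + 1) - i - 1
            ∧ pvScanR f d (i + 1) - i - 1 ≤ 6) := by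
      rw [mem_16]
      constructor
      · rintro ⟨⟨h1, h2⟩, -, h3⟩; exact ⟨h3, by omega, by omega⟩
      · rintro ⟨h1, h2, h3⟩; exact ⟨⟨by omega, by omega⟩, hfi, h1⟩
    have hLc : (((i : Int) - 1 - pvScanL f d ((i : Int) - 1)).toNat ∈ [1, 2, 3, 4, 5, 6]
          ∧ (f[i]? = some c ∧ 0 ≤ pvScanL f d ((i : Int) - 1)
             ∧ f[(pvScanL f d ((i : Int) - 1)).toNat]? = some c))
        ↔ (0 ≤ pvScanL f d ((i : Int) - 1)
            ∧ f[(pvScanL f d ((i : Int) - 1)).toNat]? = some c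
            ∧ 1 ≤ (i : Int) - pvScanL f d ((i : Int) - 1) - 1
            ∧ (i : Int) - pvScanL f d ((i : Int) - 1) - 1 ≤ 6) := by
      rw [mem_16]
      constructor
      · rintro ⟨⟨h1, h2⟩, -, h3, h4⟩; exact ⟨h3, h4, by omega, by omega⟩
      · rintro ⟨h1, h2, h3, h4⟩; exact ⟨⟨by omega, by omega⟩, hfi, h1, h2⟩
    rw [if_congr hRc rfl rfl]
    by_cases hR : f[pvScanR f d (i + 1)]? = some c ∧ 1 ≤ pvScanR f d (i + 1) - i - 1
        ∧ pvScanR f d (i + 1) - i - 1 ≤ 6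
    · rw [if_pos hR, if_pos hR, if_congr hLc rfl rfl]
    · rw [if_neg hR, if_neg hR, if_congr hLc rfl rfl]
  · have hnR : ¬(pvScanR f d (i + 1) - (i + 1) ∈ [1, 2, 3, 4, 5, 6]
        ∧ (f[i]? = some c ∧ f[pvScanR f d (i + 1)]? = some c)) := fun hx => hfi hx.2.1
    have hnL : ¬(((i : Int) - 1 - pvScanL f d ((i : Int) - 1)).toNat ∈ [1, 2, 3, 4, 5, 6]
        ∧ (f[i]? = some c ∧ 0 ≤ pvScanL f d ((i : Int) - 1)
           ∧ f[(pvScanL f d ((i : Int) - 1)).toNat]? = some c)) := fun hx => hfi hx.2.1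
    rw [if_neg hfi, if_neg hnR, if_neg hnL]


theorem lineAB (pos player opp : String) (line : List String) (g : PySem.Dict String String)
    (hkeys : pos ∈ line → ∀ x ∈ line, g.contains x = true) :
    pvLineA pos player opp g line
      = pvLineB pos player opp (if player = "X" then ('X', 'O') else ('O', 'X')) g line := by
  by_cases hpos : pos ∈ line
  · obtain ⟨i, hi⟩ := Option.isSome_iff_exists.mp ((PySem.List.index?_isSome_iff line pos).mpr hpos)
    obtain ⟨hilen, -, -⟩ := PySem.List.getElem_of_index?_eq_some hi
    simp only [pvLineA, pvLineB, if_pos hpos]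
    by_cases hguard : player ∈ line.map (fun x => g.getD x "")
        ∧ opp ∈ line.map (fun x => g.getD x "")
    · rw [if_pos hguard, if_pos hguard]
      by_cases hpl : player = "X"
      · rw [if_pos hpl, if_pos hpl, pvSetsX_eq]
        rw [inner_to_B line pos player _ 'X' 'O' (by decide) i hi hilen g (hkeys hpos)]
        simp only [hi, Option.getD_some]
        split_ifs <;> rfl
      · rw [if_neg hpl, if_neg hpl, pvSetsO_eq]
        rw [inner_to_B line pos player _ 'O' 'X' (by decide) i hi hilen g (hkeys hpos)]
        simp only [hi, Option.getD_some]
        split_ifs <;> rfl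
    · rw [if_neg hguard, if_neg hguard]
  · simp only [pvLineA, pvLineB, if_neg hpos]

theorem contains_lineB_mono (pos player opp : String) (cd : Char × Char) (line : List String)
    (g : PySem.Dict String String) (x : String) (h : g.contains x = true) :
    (pvLineB pos player opp cd g line).contains x = true := by
  simp only [pvLineB]
  split_ifs <;>
    first
      | exact h
      | exact contains_flip_mono _ _ _ _ _ _ h
      | exact contains_flip_mono _ _ _ _ _ _ (contains_flip_mono _ _ _ _ _ _ h)

theorem fold_table (pos player opp : String) :
    ∀ (table : List (List String)) (g : PySem.Dict String String),
      (∀ line ∈ table, pos ∈ line → ∀ x ∈ line, g.contains x = true) →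
      table.foldl (pvLineA pos player opp) g
        = table.foldl (pvLineB pos player opp
            (if player = "X" then ('X', 'O') else ('O', 'X'))) g := by
  intro table
  induction table with
  | nil => intro g _; rfl
  | cons t ts ih =>
      intro g hkeys
      simp only [List.foldl_cons]
      rw [lineAB pos player opp t g (hkeys t (by simp))]
      exact ih _ (fun line hline hposl x hx =>
        contains_lineB_mono pos player opp _ t g x (hkeys line (by simp [hline]) hposl x hx))


-- ===== VERDICT (by name: the statement is the Claim_ definition above) =====
theorem flipTokens2_spec : Claim_equal_flipTokens2 := by
  intro game2 pos table player opp hdom hpre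
  unfold Spec_flipTokens2 flipTokens2 flipTokens2_alt
  exact congrArg PySem.Dict.items (fold_table pos player opp table _ hpre.1)
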